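-- pv_equiv track=rewrite | github.com/Xaheersays/recursion | maze Count ways to reach/mazePathsDiagonally/pathsIncludingDiagonalpaths.py | pathsDiagonally
-- ===== SOURCE A (Python) =====
-- def pathsDiagonally(pro,row,col):
--     res = []
--     if row ==1 and col ==1:
--         res.append(pro)
--         return res
--
--     if row>1:
--         left = pathsDiagonally(pro+"b",row-1,col)
--         for e in left:
--             res.append(e)
--     if col >1:
--         right =pathsDiagonally(pro+"r",row,col-1)
--         for e in right:
--             res.append(e)
--     if row > 1 and col > 1:
--         diagonal  = pathsDiagonally(pro+"d",row-1,col-1)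
--         for d in diagonal:
--             res.append(d)
--     return res
-- ===== SOURCE B (Python) =====
-- def pathsDiagonally(pro, row, col):
--     res = []
--     stack = [(pro, row, col)]
--     while stack:
--         p, r, c = stack.pop()
--         if r == 1 and c == 1:
--             res.append(p)
--             continue
--         if r > 1 and c > 1:
--             stack.append((p + "d", r - 1, c - 1))
--         if c > 1:
--             stack.append((p + "r", r, c - 1))
--         if r > 1:
--             stack.append((p + "b", r - 1, c))
--     return res
-- ===== Notes on version B (the rewrite author's own statement) =====
-- stated objective: alternative
-- what changed: Replaces A's three-way recursion with an iterative DFS over an explicit stack of (prefix,row,col) frames, pushing children in reverse (d, r, b) so pops reproduce A's exact output order.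
import Mathlib
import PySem

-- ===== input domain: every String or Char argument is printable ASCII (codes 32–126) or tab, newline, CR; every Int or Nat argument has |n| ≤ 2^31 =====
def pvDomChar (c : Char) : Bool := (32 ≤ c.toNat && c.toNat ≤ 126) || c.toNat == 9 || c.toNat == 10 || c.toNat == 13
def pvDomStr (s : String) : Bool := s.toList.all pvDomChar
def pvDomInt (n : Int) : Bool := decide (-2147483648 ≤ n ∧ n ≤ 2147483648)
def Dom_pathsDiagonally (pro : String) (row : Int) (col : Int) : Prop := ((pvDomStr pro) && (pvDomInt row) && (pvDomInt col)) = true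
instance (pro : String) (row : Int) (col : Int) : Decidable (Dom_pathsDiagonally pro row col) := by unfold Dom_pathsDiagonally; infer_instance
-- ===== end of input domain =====

-- B replaces A's three-way recursion by an iterative DFS over an explicit stack of (prefix,row,col) frames (alternative decomposition, same cost).

-- ===== PORT A =====
-- literal port of A's recursion: base case appends pro, then the three guarded recursive calls in order b, r, d
def pathsDiagonally (pro : String) (row : Int) (col : Int) : List String :=
  if row = 1 ∧ col = 1 then [pro]
  else
    (if row > 1 then pathsDiagonally (pro ++ "b") (row - 1) col else []) ++
    (if col > 1 then pathsDiagonally (pro ++ "r") row (col - 1) else []) ++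
    (if row > 1 ∧ col > 1 then pathsDiagonally (pro ++ "d") (row - 1) (col - 1) else [])
termination_by (row.toNat + col.toNat)
decreasing_by all_goals omega

-- ===== PORT B =====
-- measure of one stack frame, used only to prove the loop terminates
def pvM (f : String × Int × Int) : Nat := 4 ^ (f.2.1.toNat + f.2.2.toNat)

-- termination helper: the frames pushed for (r, c) together measure less than the popped frame
theorem pvChildren_lt (r c : Int) :
    (if r > 1 then (4:Nat) ^ ((r - 1).toNat + c.toNat) else 0) +
    (if c > 1 then (4:Nat) ^ (r.toNat + (c - 1).toNat) else 0) +
    (if r > 1 ∧ c > 1 then (4:Nat) ^ ((r - 1).toNat + (c - 1).toNat) else 0) <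
    4 ^ (r.toNat + c.toNat) := by
  have pm : ∀ n : Nat, 0 < (4:Nat) ^ n := fun n => pow_pos (by norm_num) n
  have mono : ∀ a b : Nat, a < b → (4:Nat) ^ a < 4 ^ b := fun a b h =>
    Nat.pow_lt_pow_right (by norm_num) h
  split_ifs with hr hc hd hd hc hd hd
  · obtain ⟨m, hm⟩ : ∃ m, r.toNat + c.toNat = m + 2 := ⟨r.toNat + c.toNat - 2, by omega⟩
    have e1 : (r - 1).toNat + c.toNat = m + 1 := by omega
    have e2 : r.toNat + (c - 1).toNat = m + 1 := by omega
    have e3 : (r - 1).toNat + (c - 1).toNat = m := by omega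
    rw [e1, e2, e3, hm, pow_succ, pow_succ]
    have := pm m; omega
  · exact absurd ⟨hr, hc⟩ hd
  · exact absurd hd.2 hc
  · have := mono ((r - 1).toNat + c.toNat) (r.toNat + c.toNat) (by omega); omega
  · exact absurd hd.1 hr
  · have := mono (r.toNat + (c - 1).toNat) (r.toNat + c.toNat) (by omega); omega
  · exact absurd hd.1 hr
  · have := pm (r.toNat + c.toNat); omega

-- the while-loop of Source B: head of the list = top of the stack (Python pushes d, r, b to
-- the end of its list and pops from the end, so b is popped first = head here)
def pvLoop (stack : List (String × Int × Int)) (res : List String) : List String :=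
  match stack with
  | [] => res
  | (p, r, c) :: rest =>
    if r = 1 ∧ c = 1 then pvLoop rest (res ++ [p])
    else pvLoop
      ((if r > 1 then [(p ++ "b", r - 1, c)] else []) ++
       (if c > 1 then [(p ++ "r", r, c - 1)] else []) ++
       (if r > 1 ∧ c > 1 then [(p ++ "d", r - 1, c - 1)] else []) ++ rest) res
termination_by (stack.map pvM).sum
decreasing_by
  · have : 0 < pvM (p, r, c) := pow_pos (by norm_num) _
    simp only [List.map_cons, List.sum_cons]; omega
  · simp only [List.map_append, List.sum_append, List.map_cons, List.sum_cons]
    have key := pvChildren_lt r c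
    split_ifs at key ⊢ <;>
      simp only [List.map_cons, List.map_nil, List.sum_cons, List.sum_nil, pvM] at * <;> omega

def pathsDiagonally_alt (pro : String) (row : Int) (col : Int) : List String :=
  pvLoop [(pro, row, col)] []

-- ===== PRECONDITION & SPEC =====
-- Pre_ excludes exactly the inputs on which A raises RecursionError: its recursion nests
-- (row-1)+(col-1) frames deep (clamped at 0), and CPython's default limit makes A raise
-- exactly when that depth reaches 999; everywhere A returns, the claim covers it.
def Pre_pathsDiagonally (pro : String) (row : Int) (col : Int) : Prop :=
  (row - 1).toNat + (col - 1).toNat ≤ 998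
instance (pro : String) (row : Int) (col : Int) : Decidable (Pre_pathsDiagonally pro row col) := by unfold Pre_pathsDiagonally; infer_instance
def pvWitness_pathsDiagonally : String × Int × Int := ("", 3, 3)

def Spec_pathsDiagonally (pro : String) (row : Int) (col : Int) (out : List String) : Prop := out = pathsDiagonally_alt pro row col
instance (pro : String) (row : Int) (col : Int) (out : List String) : Decidable (Spec_pathsDiagonally pro row col out) := by unfold Spec_pathsDiagonally; infer_instance

-- ===== CLAIM =====
def Claim_equal_pathsDiagonally : Prop := ∀ (pro : String) (row : Int) (col : Int), Dom_pathsDiagonally pro row col → Pre_pathsDiagonally pro row col → Spec_pathsDiagonally pro row col (pathsDiagonally pro row col)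

-- ===== LEMMAS AND PROOFS =====
-- loop invariant: the loop returns res followed by A's answer for every frame still on the stack
theorem pvLoop_spec (stack : List (String × Int × Int)) (res : List String) :
    pvLoop stack res = res ++ stack.flatMap (fun f => pathsDiagonally f.1 f.2.1 f.2.2) := by
  fun_induction pvLoop with
  | case1 res => simp
  | case2 res p r c rest hb ih =>
      have hpd : pathsDiagonally p r c = [p] := by
        rw [pathsDiagonally.eq_def, if_pos hb]
      rw [ih, List.flatMap_cons, hpd]
      simp
  | case3 res p r c rest hb ih =>
      have hpd : pathsDiagonally p r c =
          (if r > 1 then pathsDiagonally (p ++ "b") (r - 1) c else []) ++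
          (if c > 1 then pathsDiagonally (p ++ "r") r (c - 1) else []) ++
          (if r > 1 ∧ c > 1 then pathsDiagonally (p ++ "d") (r - 1) (c - 1) else []) := by
        rw [pathsDiagonally.eq_def, if_neg hb]
      simp only [dite_eq_ite] at ih
      rw [ih, List.flatMap_cons, List.flatMap_append, List.flatMap_append, hpd]
      split_ifs <;> simp

-- ===== VERDICT =====
theorem pathsDiagonally_spec : Claim_equal_pathsDiagonally := by
  intro pro row col _ _
  show _ = _
  rw [pathsDiagonally_alt, pvLoop_spec]
  simp
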